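-- pv_equiv track=rewrite | github.com/hildenost/advent-of-code | 2015/20/infinite.py | finite_fact
-- ===== SOURCE A (Python) =====
-- import math
--
-- def finite_fact(number):
--   if number == 0:
--     return 0
--   roof = math.floor(math.sqrt(number)) + 1
--   factors = set()
--   for n in range(1, roof):
--     if number % n == 0:
--       factors.update({n, number // n})
--
--   factors = {f for f in factors if f*50 >= number}
--   return sum(factors)*11
-- ===== SOURCE B (Python) =====
-- def finite_fact(number):
--     total = 0
--     for c in range(1, 51):
--         if number % c == 0:
--             total += number // c
--     return total * 11
-- ===== Notes on version B (the rewrite author's own statement) =====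
-- stated objective: faster
-- what changed: Replaces the sqrt(n)-bounded divisor-pair enumeration with a set and a filter by a single fixed scan of the 50 possible cofactors c=1..50, adding number//c when c divides number (f*50>=number iff cofactor<=50).
import Mathlib
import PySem

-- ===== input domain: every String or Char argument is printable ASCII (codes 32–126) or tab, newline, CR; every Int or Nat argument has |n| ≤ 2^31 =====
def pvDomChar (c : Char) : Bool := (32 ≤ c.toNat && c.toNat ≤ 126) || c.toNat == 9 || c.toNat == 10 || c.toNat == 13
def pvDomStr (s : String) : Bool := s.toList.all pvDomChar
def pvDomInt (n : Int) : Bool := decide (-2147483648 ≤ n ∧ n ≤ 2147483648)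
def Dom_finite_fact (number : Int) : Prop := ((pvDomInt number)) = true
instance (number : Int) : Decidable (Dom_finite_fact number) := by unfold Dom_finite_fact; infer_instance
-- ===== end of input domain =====

-- B replaces A's sqrt-bounded divisor-pair enumeration by a fixed scan of the 50 possible cofactors (faster).

-- ===== PORT A =====
-- math.floor(math.sqrt(number)) is ported as Nat.sqrt: exact for 0 ≤ number ≤ 2^31
-- (double sqrt is correctly rounded and the gap to the next square exceeds half an ulp there).
def finite_fact (number : Int) : Int :=
  if number = 0 then 0
  else
    let roof : Int := (Nat.sqrt number.toNat : Int) + 1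
    let factors : PySem.Set Int :=
      (PySem.List.pyRange 1 roof 1).foldl
        (fun s n =>
          if PySem.Int.mod number n = 0 then
            PySem.Set.update s [n, PySem.Int.floordiv number n]
          else s)
        PySem.Set.empty
    let factors2 : PySem.Set Int :=
      PySem.Set.ofList (factors.filter (fun f => decide (f * 50 ≥ number)))
    factors2.sum * 11

-- ===== PORT B =====
def finite_fact_alt (number : Int) : Int :=
  let total : Int :=
    (PySem.List.pyRange 1 51 1).foldl
      (fun acc c =>
        if PySem.Int.mod number c = 0 then acc + PySem.Int.floordiv number c else acc)
      0
  total * 11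

-- ===== PRECONDITION & SPEC =====
-- Pre_ excludes exactly number < 0, where A raises ValueError in math.sqrt.
def Pre_finite_fact (number : Int) : Prop := 0 ≤ number
instance (number : Int) : Decidable (Pre_finite_fact number) := by unfold Pre_finite_fact; infer_instance
def pvWitness_finite_fact : Int := (12)
def Spec_finite_fact (number : Int) (out : Int) : Prop := out = finite_fact_alt number
instance (number : Int) (out : Int) : Decidable (Spec_finite_fact number out) := by unfold Spec_finite_fact; infer_instance

-- ===== CLAIM (what is proved, stated in full; the proofs are below) =====
def Claim_equal_finite_fact : Prop := ∀ (number : Int), Dom_finite_fact number → Pre_finite_fact number → Spec_finite_fact number (finite_fact number)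

-- ===== LEMMAS AND PROOFS =====

-- membership in A's divisor-collecting loop
lemma pv_fold_mem (number : Int) (L : List Int) (s : PySem.Set Int) (x : Int) :
    x ∈ L.foldl (fun s n => if PySem.Int.mod number n = 0 then
        PySem.Set.update s [n, PySem.Int.floordiv number n] else s) s ↔
      x ∈ s ∨ ∃ d ∈ L, PySem.Int.mod number d = 0 ∧ (x = d ∨ x = PySem.Int.floordiv number d) := by
  induction L generalizing s with
  | nil => simp
  | cons d L ih =>
    simp only [List.foldl_cons]
    by_cases hd : PySem.Int.mod number d = 0
    · rw [if_pos hd, ih]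
      simp only [PySem.Set.mem_update, List.mem_cons, List.not_mem_nil, or_false]
      constructor
      · rintro ((hs | hx | hx) | ⟨e, he, hm, hx⟩)
        · exact Or.inl hs
        · exact Or.inr ⟨d, Or.inl rfl, hd, Or.inl hx⟩
        · exact Or.inr ⟨d, Or.inl rfl, hd, Or.inr hx⟩
        · exact Or.inr ⟨e, Or.inr he, hm, hx⟩
      · rintro (hs | ⟨e, he, hm, hx⟩)
        · exact Or.inl (Or.inl hs)
        · rcases he with rfl | he
          · exact Or.inl (Or.inr hx)
          · exact Or.inr ⟨e, he, hm, hx⟩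
    · rw [if_neg hd, ih]
      constructor
      · rintro (hs | ⟨e, he, hm, hx⟩)
        · exact Or.inl hs
        · exact Or.inr ⟨e, List.mem_cons_of_mem _ he, hm, hx⟩
      · rintro (hs | ⟨e, he, hm, hx⟩)
        · exact Or.inl hs
        · rcases List.mem_cons.1 he with rfl | he
          · exact absurd hm hd
          · exact Or.inr ⟨e, he, hm, hx⟩

lemma pv_fold_nodup (number : Int) (L : List Int) (s : PySem.Set Int) (h : s.Nodup) :
    (L.foldl (fun s n => if PySem.Int.mod number n = 0 then
        PySem.Set.update s [n, PySem.Int.floordiv number n] else s) s).Nodup := by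
  induction L generalizing s with
  | nil => exact h
  | cons d L ih =>
    simp only [List.foldl_cons]
    by_cases hd : PySem.Int.mod number d = 0
    · rw [if_pos hd]; exact ih _ (PySem.Set.nodup_update _ _ h)
    · rw [if_neg hd]; exact ih _ h

-- the integer square-root bracket, cast to Int
lemma pv_sq_lt (number : Int) (hpos : 0 < number) :
    number < ((Nat.sqrt number.toNat : Int) + 1) * ((Nat.sqrt number.toNat : Int) + 1) := by
  have h := Nat.lt_succ_sqrt number.toNat
  zify at h
  rwa [Int.toNat_of_nonneg (le_of_lt hpos)] at h

-- A's set collects exactly the positive divisors of number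
lemma pv_divisor_char (number x : Int) (hpos : 0 < number) :
    (∃ d, (1 ≤ d ∧ d < (Nat.sqrt number.toNat : Int) + 1) ∧ PySem.Int.mod number d = 0 ∧
        (x = d ∨ x = PySem.Int.floordiv number d)) ↔ x ∣ number ∧ 1 ≤ x := by
  constructor
  · rintro ⟨d, ⟨hd1, hd2⟩, hm, hx⟩
    have hdvd : d ∣ number := (PySem.Int.mod_eq_zero_iff_dvd number d).1 hm
    obtain ⟨k, hk⟩ := hdvd
    have hd0 : (0 : Int) < d := by omega
    have hfd : PySem.Int.floordiv number d = k := by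
      rw [PySem.Int.floordiv_eq_ediv_of_pos hd0, hk, Int.mul_ediv_cancel_left _ (by omega)]
    have hk1 : 1 ≤ k := by nlinarith
    rcases hx with rfl | rfl
    · exact ⟨⟨k, hk⟩, hd1⟩
    · rw [hfd]; exact ⟨⟨d, by rw [hk]; ring⟩, hk1⟩
  · rintro ⟨⟨k, hk⟩, hx1⟩
    have hx0 : (0 : Int) < x := by omega
    have hk1 : 1 ≤ k := by nlinarith
    have hsq := pv_sq_lt number hpos
    rcases le_or_gt x (Nat.sqrt number.toNat : Int) with hle | hgt
    · exact ⟨x, ⟨hx1, by omega⟩, (PySem.Int.mod_eq_zero_iff_dvd number x).2 ⟨k, hk⟩, Or.inl rfl⟩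
    · have hkle : k ≤ (Nat.sqrt number.toNat : Int) := by nlinarith
      refine ⟨k, ⟨hk1, by omega⟩, (PySem.Int.mod_eq_zero_iff_dvd number k).2 ⟨x, by rw [hk]; ring⟩, Or.inr ?_⟩
      rw [PySem.Int.floordiv_eq_ediv_of_pos (by omega), hk, mul_comm, Int.mul_ediv_cancel_left _ (by omega)]

-- main equality for positive number
lemma pv_main (number : Int) (hpos : 0 < number) :
    finite_fact number = finite_fact_alt number := by
  -- B's side: fold = sum over dividing cofactors in 1..50
  have hB : finite_fact_alt number =
      (((PySem.List.pyRange 1 51 1).filter (fun c => decide (PySem.Int.mod number c = 0))).map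
        (fun c => PySem.Int.floordiv number c)).sum * 11 := by
    simp only [finite_fact_alt]
    rw [PySem.List.foldl_ite_eq_foldl_filter (p := fun c => PySem.Int.mod number c = 0)
      (f := fun acc c => acc + PySem.Int.floordiv number c)]
    rw [PySem.List.foldl_add (g := fun c => PySem.Int.floordiv number c)]
    ring_nf
  -- A's side
  have hne : ¬ number = 0 := by omega
  set F : PySem.Set Int :=
    (PySem.List.pyRange 1 ((Nat.sqrt number.toNat : Int) + 1) 1).foldl
      (fun s n =>
        if PySem.Int.mod number n = 0 then
          PySem.Set.update s [n, PySem.Int.floordiv number n]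
        else s)
      PySem.Set.empty with hF
  have hFnodup : F.Nodup := pv_fold_nodup number _ _ (by exact List.nodup_nil)
  have hFmem : ∀ x : Int, x ∈ F ↔ x ∣ number ∧ 1 ≤ x := by
    intro x
    rw [hF, pv_fold_mem]
    simp only [PySem.Set.empty, List.not_mem_nil, false_or, PySem.List.mem_pyRange_one]
    exact pv_divisor_char number x hpos
  have hA : finite_fact number =
      (F.filter (fun f => decide (f * 50 ≥ number))).sum * 11 := by
    simp only [finite_fact, if_neg hne]
    rw [← hF, PySem.Set.ofList_eq_self_of_nodup _ (List.Nodup.filter _ hFnodup)]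
  -- the two filtered lists are permutations of each other
  have hperm : (F.filter (fun f => decide (f * 50 ≥ number))).Perm
      (((PySem.List.pyRange 1 51 1).filter (fun c => decide (PySem.Int.mod number c = 0))).map
        (fun c => PySem.Int.floordiv number c)) := by
    apply (List.perm_ext_iff_of_nodup (List.Nodup.filter _ hFnodup) ?_).2
    · intro x
      rw [List.mem_filter, hFmem]
      simp only [decide_eq_true_eq, List.mem_map, List.mem_filter, PySem.List.mem_pyRange_one]
      constructor
      · rintro ⟨⟨⟨k, hk⟩, hx1⟩, h50⟩
        have hx0 : (0 : Int) < x := by omega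
        have hk1 : 1 ≤ k := by nlinarith
        have hk50 : k ≤ 50 := by nlinarith
        refine ⟨k, ⟨⟨hk1, by omega⟩, ?_⟩, ?_⟩
        · exact (PySem.Int.mod_eq_zero_iff_dvd number k).2 ⟨x, by rw [hk]; ring⟩
        · rw [PySem.Int.floordiv_eq_ediv_of_pos (by omega), hk, mul_comm, Int.mul_ediv_cancel_left _ (by omega)]
      · rintro ⟨c, ⟨⟨hc1, hc51⟩, hcd⟩, rfl⟩
        have hcdvd : c ∣ number := (PySem.Int.mod_eq_zero_iff_dvd number c).1 hcd
        obtain ⟨k, hk⟩ := hcdvd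
        have hk1 : 1 ≤ k := by nlinarith
        have hfd : PySem.Int.floordiv number c = k := by
          rw [PySem.Int.floordiv_eq_ediv_of_pos (by omega), hk, Int.mul_ediv_cancel_left _ (by omega)]
        rw [hfd]
        exact ⟨⟨⟨c, by rw [hk]; ring⟩, hk1⟩, by nlinarith⟩
    · apply List.Nodup.map_on
      · intro c hc c' hc' heq
        rw [List.mem_filter] at hc hc'
        have h1 := PySem.List.mem_pyRange_one.1 hc.1
        have h1' := PySem.List.mem_pyRange_one.1 hc'.1
        obtain ⟨k, hk⟩ := (PySem.Int.mod_eq_zero_iff_dvd number c).1 (of_decide_eq_true hc.2)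
        obtain ⟨k', hk'⟩ := (PySem.Int.mod_eq_zero_iff_dvd number c').1 (of_decide_eq_true hc'.2)
        have hfd : PySem.Int.floordiv number c = k := by
          rw [PySem.Int.floordiv_eq_ediv_of_pos (by omega), hk, Int.mul_ediv_cancel_left _ (by omega)]
        have hfd' : PySem.Int.floordiv number c' = k' := by
          rw [PySem.Int.floordiv_eq_ediv_of_pos (by omega), hk', Int.mul_ediv_cancel_left _ (by omega)]
        rw [hfd, hfd'] at heq
        subst heq
        have hk1 : 1 ≤ k := by nlinarith
        nlinarith [hk, hk']
      · exact List.Nodup.filter _ (by decide)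
  rw [hA, hB, hperm.sum_eq]

-- ===== VERDICT (by name: the statement is the Claim_ definition above) =====
theorem finite_fact_spec : Claim_equal_finite_fact := by
  intro number _ hpre
  unfold Spec_finite_fact
  rcases eq_or_lt_of_le hpre with hz | hpos
  · rw [← hz]; decide
  · exact pv_main number hpos
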